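-- pv_equiv track=rewrite | github.com/yaniv-golan/openai-model-registry | src/openai_model_registry/data_manager.py | _extract_change_summary
-- ===== SOURCE A (Python) =====
-- def _extract_change_summary(release_body: str) -> str:
--     """Extract a one-sentence summary from release body.
--
--     Args:
--         release_body: The full release body text
--
--     Returns:
--         One-sentence summary of the changes
--     """
--     if not release_body:
--         return "No description available"
--
--     # Clean up the release body
--     lines = release_body.strip().split("\n")
--
--     # Look for the first meaningful line that's not a header
--     for line in lines:
--         line = line.strip()
--         if line and not line.startswith("#") and not line.startswith("**") and len(line) > 10:
--             # Take first sentence or first 100 characters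
--             if "." in line:
--                 first_sentence = line.split(".")[0] + "."
--                 if len(first_sentence) > 20:  # Make sure it's substantial
--                     return first_sentence
--
--             # Fallback to first 100 characters
--             if len(line) > 100:
--                 return line[:97] + "..."
--             return line
--
--     # Fallback to first non-empty line
--     for line in lines:
--         line = line.strip()
--         if line:
--             if len(line) > 100:
--                 return line[:97] + "..."
--             return line
--
--     return "No description available"
-- ===== SOURCE B (Python) =====
-- def _extract_change_summary(release_body: str) -> str:
--     """Extract a one-sentence summary from release body (single pass)."""
--     if not release_body:
--         return "No description available"
--
--     fallback = None
--     for raw in release_body.strip().split("\n"):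
--         line = raw.strip()
--         if line and fallback is None:
--             fallback = line
--         if line and not line.startswith("#") and not line.startswith("**") and len(line) > 10:
--             if "." in line:
--                 first_sentence = line.split(".")[0] + "."
--                 if len(first_sentence) > 20:
--                     return first_sentence
--             if len(line) > 100:
--                 return line[:97] + "..."
--             return line
--
--     if fallback is not None:
--         if len(fallback) > 100:
--             return fallback[:97] + "..."
--         return fallback
--     return "No description available"
-- ===== Notes on version B (the rewrite author's own statement) =====
-- stated objective: simpler
-- what changed: Replaces A's two successive scans over the lines (meaningful-line search, then fallback non-empty-line search) by a single pass that records the first non-empty line as fallback while searching for a meaningful line.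
import Mathlib
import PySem

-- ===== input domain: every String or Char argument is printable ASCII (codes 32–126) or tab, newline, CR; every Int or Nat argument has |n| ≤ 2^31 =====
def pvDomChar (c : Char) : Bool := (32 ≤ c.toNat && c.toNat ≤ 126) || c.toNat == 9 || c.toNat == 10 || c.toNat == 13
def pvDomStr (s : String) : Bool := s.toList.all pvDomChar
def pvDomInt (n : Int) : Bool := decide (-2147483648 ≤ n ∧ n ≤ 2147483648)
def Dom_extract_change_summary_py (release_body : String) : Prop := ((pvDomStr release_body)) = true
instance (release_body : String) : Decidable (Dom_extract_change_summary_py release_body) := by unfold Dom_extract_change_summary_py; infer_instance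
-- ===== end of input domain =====

-- B replaces A's two successive scans over the lines by a single pass that carries the
-- first non-empty line as a fallback (objective: simpler decomposition, same cost).

-- ===== PORT A =====
-- first loop of A: first "meaningful" line, already formatted (some = return value)
def pyA_loop1 : List (List Char) → Option (List Char)
  | [] => none
  | l :: ls =>
    let line := PySem.Chars.strip l
    if line ≠ [] ∧ PySem.Chars.startswith line "#".toList = false ∧
       PySem.Chars.startswith line "**".toList = false ∧ 10 < line.length then
      if PySem.Chars.isIn ".".toList line then
        let fs := (PySem.Chars.splitOn line ".".toList).headD [] ++ ".".toList
        if 20 < fs.length then some fs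
        else if 100 < line.length then some (PySem.List.slice line none (some 97) ++ "...".toList)
        else some line
      else if 100 < line.length then some (PySem.List.slice line none (some 97) ++ "...".toList)
      else some line
    else pyA_loop1 ls

-- second loop of A: first non-empty line, formatted
def pyA_loop2 : List (List Char) → Option (List Char)
  | [] => none
  | l :: ls =>
    let line := PySem.Chars.strip l
    if line ≠ [] then
      if 100 < line.length then some (PySem.List.slice line none (some 97) ++ "...".toList)
      else some line
    else pyA_loop2 ls

def extract_change_summary_py (release_body : String) : String :=
  if release_body.toList = [] then "No description available"
  else
    match pyA_loop1 (PySem.Chars.splitOn (PySem.Chars.strip release_body.toList) "\n".toList) with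
    | some r => String.ofList r
    | none =>
      match pyA_loop2 (PySem.Chars.splitOn (PySem.Chars.strip release_body.toList) "\n".toList) with
      | some r => String.ofList r
      | none => "No description available"

-- ===== PORT B =====
-- single pass of B: fallback carries the first non-empty line seen so far
def pyB_loop : List (List Char) → Option (List Char) → List Char
  | [], fallback =>
    match fallback with
    | some f =>
      if 100 < f.length then PySem.List.slice f none (some 97) ++ "...".toList else f
    | none => "No description available".toList
  | l :: ls, fallback =>
    let line := PySem.Chars.strip l
    let fb := if line ≠ [] ∧ fallback = none then some line else fallback
    if line ≠ [] ∧ PySem.Chars.startswith line "#".toList = false ∧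
       PySem.Chars.startswith line "**".toList = false ∧ 10 < line.length then
      if PySem.Chars.isIn ".".toList line then
        let fs := (PySem.Chars.splitOn line ".".toList).headD [] ++ ".".toList
        if 20 < fs.length then fs
        else if 100 < line.length then PySem.List.slice line none (some 97) ++ "...".toList
        else line
      else if 100 < line.length then PySem.List.slice line none (some 97) ++ "...".toList
      else line
    else pyB_loop ls fb

def extract_change_summary_py_alt (release_body : String) : String :=
  if release_body.toList = [] then "No description available"
  else
    String.ofList (pyB_loop (PySem.Chars.splitOn (PySem.Chars.strip release_body.toList) "\n".toList) none)

-- ===== PRECONDITION & SPEC =====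
def Spec_extract_change_summary_py (release_body : String) (out : String) : Prop := out = extract_change_summary_py_alt release_body
instance (release_body : String) (out : String) : Decidable (Spec_extract_change_summary_py release_body out) := by unfold Spec_extract_change_summary_py; infer_instance

-- ===== CLAIM (what is proved, stated in full; the proofs are below) =====
def Claim_equal_extract_change_summary_py : Prop := ∀ (release_body : String), Dom_extract_change_summary_py release_body → Spec_extract_change_summary_py release_body (extract_change_summary_py release_body)

-- ===== LEMMAS AND PROOFS =====
theorem pyB_loop_eq (ls : List (List Char)) (fb : Option (List Char)) :
    pyB_loop ls fb =
      match pyA_loop1 ls with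
      | some r => r
      | none =>
        match fb with
        | some f => if 100 < f.length then PySem.List.slice f none (some 97) ++ "...".toList else f
        | none =>
          match pyA_loop2 ls with
          | some r => r
          | none => "No description available".toList := by
  induction ls generalizing fb with
  | nil => cases fb <;> simp [pyB_loop, pyA_loop1, pyA_loop2]
  | cons l ls ih =>
    simp only [pyB_loop, pyA_loop1, pyA_loop2]
    by_cases hm : PySem.Chars.strip l ≠ [] ∧
        PySem.Chars.startswith (PySem.Chars.strip l) "#".toList = false ∧
        PySem.Chars.startswith (PySem.Chars.strip l) "**".toList = false ∧
        10 < (PySem.Chars.strip l).length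
    · rw [if_pos hm, if_pos hm]
      split_ifs <;> rfl
    · rw [if_neg hm, if_neg hm]
      by_cases he : PySem.Chars.strip l ≠ []
      · cases fb with
        | none =>
          rw [if_pos ⟨he, rfl⟩, ih]
          cases pyA_loop1 ls with
          | some r => rfl
          | none =>
            rw [if_pos he]
            by_cases hl : 100 < (PySem.Chars.strip l).length <;> simp [hl]
        | some f =>
          rw [if_neg (by simp), ih]
      · simp only [ne_eq, not_not] at he
        rw [if_neg (by simp [he]), ih, if_neg (by simp [he])]

-- ===== VERDICT (by name: the statement is the Claim_ definition above) =====
theorem extract_change_summary_py_spec : Claim_equal_extract_change_summary_py := by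
  intro release_body _
  unfold Spec_extract_change_summary_py extract_change_summary_py extract_change_summary_py_alt
  by_cases h : release_body.toList = []
  · simp [h]
  · simp only [if_neg h]
    rw [pyB_loop_eq]
    rcases hA : pyA_loop1 (PySem.Chars.splitOn (PySem.Chars.strip release_body.toList) "\n".toList) with _ | r
    · rcases h2 : pyA_loop2 (PySem.Chars.splitOn (PySem.Chars.strip release_body.toList) "\n".toList) with _ | r2 <;>
        simp
    · simp
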